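-- pv_equiv track=rewrite | github.com/takekoputa/project-euler | 1st_100/problem098.py | new_hash
-- ===== SOURCE A (Python) =====
-- def new_hash(word):
--     word_map = {}
--     n = 0
--     h = ''
--     for i, c in enumerate(word):
--         if not c in word_map:
--             word_map[c] = str(n)
--             n = n + 1
--         h = h + word_map[c]
--     return h, word_map
-- ===== SOURCE B (Python) =====
-- def new_hash(word):
--     # Distinct letters in first-occurrence order: the set of letters, sorted
--     # by each letter's first index in the word (an injective key, so the
--     # set's arbitrary iteration order cannot matter).
--     firsts = sorted(set(word), key=word.index)
--     word_map = {c: str(i) for i, c in enumerate(firsts)}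
--     return ''.join(word_map[c] for c in word), word_map
-- ===== Notes on version B (the rewrite author's own statement) =====
-- stated objective: alternative
-- what changed: Instead of A's single discovery loop that carries a counter and grows the hash string incrementally, B first obtains the alphabet as sorted(set(word), key=word.index) (an injective sort key, so the set's iteration order is irrelevant), builds the dict by enumerating that finished alphabet, and maps the word through it with join.
import Mathlib
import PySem

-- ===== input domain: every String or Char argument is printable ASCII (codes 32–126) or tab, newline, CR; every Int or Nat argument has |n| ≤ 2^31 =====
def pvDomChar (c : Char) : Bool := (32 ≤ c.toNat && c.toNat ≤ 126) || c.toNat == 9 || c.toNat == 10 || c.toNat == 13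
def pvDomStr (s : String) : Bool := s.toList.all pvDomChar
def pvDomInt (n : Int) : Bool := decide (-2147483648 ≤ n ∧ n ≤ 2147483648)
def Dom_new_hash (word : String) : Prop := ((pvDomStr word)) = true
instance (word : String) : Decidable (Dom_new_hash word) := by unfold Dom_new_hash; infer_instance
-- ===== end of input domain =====

-- B computes the first-occurrence alphabet as sorted(set(word), key=word.index)
-- and then builds the dict and the hash from that finished alphabet, instead of
-- A's single discovery loop with a running counter (objective: alternative).

-- ===== PORT A =====
-- A's loop body: maybe insert str(n), bump n, append word_map[c] to h (h as List Char)
def stepA (st : PySem.Dict String String × Int × List Char) (c : Char) :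
    PySem.Dict String String × Int × List Char :=
  let key := String.ofList [c]
  let dn := if st.1.contains key = false
            then (st.1.insert key (PySem.Int.toStr st.2.1), st.2.1 + 1)
            else (st.1, st.2.1)
  (dn.1, dn.2, st.2.2 ++ (dn.1.getD key "").toList)

def new_hash (word : String) : String × (List (String × String)) :=
  let st := word.toList.foldl stepA (PySem.Dict.empty, 0, [])
  (String.ofList st.2.2, st.1.items)

-- ===== PORT B =====
-- firsts = sorted(set(word), key=word.index); word.index always succeeds on
-- members of set(word), so '.getD 0' only totalizes the key function
def new_hash_alt (word : String) : String × (List (String × String)) :=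
  let firsts := PySem.List.sorted (PySem.Set.ofList word.toList)
                  (fun c => (PySem.List.index? word.toList c).getD 0)
  -- {c: str(i) for i, c in enumerate(firsts)}
  let d := (PySem.List.enumerate firsts).foldl
             (fun d p => d.insert (String.ofList [p.2]) (PySem.Int.toStr p.1)) PySem.Dict.empty
  -- ''.join(word_map[c] for c in word)
  (String.ofList ((word.toList.map (fun c => (d.getD (String.ofList [c]) "").toList)).flatten),
   d.items)

-- ===== PRECONDITION & SPEC =====
def Spec_new_hash (word : String) (out : String × (List (String × String))) : Prop := out = new_hash_alt word
instance (word : String) (out : String × (List (String × String))) : Decidable (Spec_new_hash word out) := by unfold Spec_new_hash; infer_instance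

-- ===== CLAIM (what is proved, stated in full; the proofs are below) =====
def Claim_equal_new_hash : Prop := ∀ (word : String), Dom_new_hash word → Spec_new_hash word (new_hash word)

-- ===== LEMMAS AND PROOFS =====

-- the dict-comprehension fold of B, generalized over the enumerate start and seed dict
def dmapFrom (k : Int) (e : List Char) (d : PySem.Dict String String) : PySem.Dict String String :=
  (PySem.List.enumerate e k).foldl
    (fun d p => d.insert (String.ofList [p.2]) (PySem.Int.toStr p.1)) d

def dmap (s : List Char) : PySem.Dict String String := dmapFrom 0 s PySem.Dict.empty

lemma key_inj {a b : Char} (h : String.ofList [a] = String.ofList [b]) : a = b := by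
  have := congrArg String.toList h; simpa using this

lemma dmapFrom_cons (k : Int) (c : Char) (e : List Char) (d : PySem.Dict String String) :
    dmapFrom k (c :: e) d = dmapFrom (k + 1) e (d.insert (String.ofList [c]) (PySem.Int.toStr k)) := by
  simp [dmapFrom, PySem.List.enumerate]

lemma dmapFrom_append (k : Int) (e₁ e₂ : List Char) (d : PySem.Dict String String) :
    dmapFrom k (e₁ ++ e₂) d = dmapFrom (k + e₁.length) e₂ (dmapFrom k e₁ d) := by
  induction e₁ generalizing k d with
  | nil => simp [dmapFrom, PySem.List.enumerate]
  | cons c e ih =>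
    rw [List.cons_append, dmapFrom_cons, dmapFrom_cons, ih]
    congr 1
    push_cast [List.length_cons]
    ring

lemma get?_dmapFrom_of_not_mem (e : List Char) (k : Int) (d : PySem.Dict String String)
    (c : Char) (hc : c ∉ e) :
    (dmapFrom k e d).get? (String.ofList [c]) = d.get? (String.ofList [c]) := by
  induction e generalizing k d with
  | nil => simp [dmapFrom, PySem.List.enumerate]
  | cons b e ih =>
    rw [dmapFrom_cons, ih _ _ (by simp_all)]
    exact PySem.Dict.get?_insert_of_ne _ _ (fun h => hc (by simp [key_inj h]))

lemma contains_dmapFrom (e : List Char) (k : Int) (d : PySem.Dict String String) (c : Char) :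
    (dmapFrom k e d).contains (String.ofList [c]) = (e.contains c || d.contains (String.ofList [c])) := by
  induction e generalizing k d with
  | nil => simp [dmapFrom, PySem.List.enumerate]
  | cons b e ih =>
    rw [dmapFrom_cons, ih]
    by_cases h : c = b
    · subst h
      simp [PySem.Dict.contains_eq_isSome_get?, PySem.Dict.get?_insert_self]
    · rw [PySem.Dict.contains_eq_isSome_get?,
          PySem.Dict.get?_insert_of_ne _ _ (fun hk => h (key_inj hk)),
          ← PySem.Dict.contains_eq_isSome_get?]
      have hbc : ¬ b = c := fun h' => h h'.symm
      simp [List.contains_cons, h, hbc]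

-- a Python-set fold of adds appends exactly the new first occurrences
lemma foldl_add_append (t : List Char) (s : PySem.Set Char) :
    t.foldl PySem.Set.add s = s ++ (PySem.Set.ofList t).filter (fun b => !s.contains b) := by
  induction t generalizing s with
  | nil => simp [PySem.Set.ofList]
  | cons c t ih =>
    have h0 : PySem.Set.add ([] : PySem.Set Char) c = [c] := by simp [PySem.Set.add]
    have hof : PySem.Set.ofList (c :: t)
        = [c] ++ (PySem.Set.ofList t).filter (fun b => !PySem.Set.contains [c] b) := by
      rw [PySem.Set.ofList_eq_foldl (c :: t), List.foldl_cons, h0, ih ([c] : PySem.Set Char)]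
    rw [List.foldl_cons, ih (PySem.Set.add s c), hof]
    by_cases hc : c ∈ s
    · have hadd : PySem.Set.add s c = s := by simp [PySem.Set.add, hc]
      rw [hadd, List.filter_append, List.filter_filter]
      have h1 : List.filter (fun b => !s.contains b) [c] = [] := by simp [hc]
      rw [h1, List.nil_append]
      refine congrArg (s ++ ·) (List.filter_congr ?_)
      intro b _
      by_cases hbs : b ∈ s <;> by_cases hbc : b = c <;> simp_all
    · have hadd : PySem.Set.add s c = s ++ [c] := by simp [PySem.Set.add, hc]
      rw [hadd, List.filter_append, List.filter_filter]
      have h1 : List.filter (fun b => !s.contains b) [c] = [c] := by simp [hc]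
      rw [h1, List.append_assoc]
      refine congrArg (s ++ ·) (congrArg ([c] ++ ·) (List.filter_congr ?_))
      intro b _
      by_cases hbs : b ∈ s <;> by_cases hbc : b = c <;> simp_all

lemma ofList_cons (c : Char) (t : List Char) :
    PySem.Set.ofList (c :: t) = [c] ++ (PySem.Set.ofList t).filter (fun b => !PySem.Set.contains [c] b) := by
  have h0 : PySem.Set.add ([] : PySem.Set Char) c = [c] := by simp [PySem.Set.add]
  rw [PySem.Set.ofList_eq_foldl (c :: t), List.foldl_cons, h0,
      foldl_add_append t ([c] : PySem.Set Char)]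

lemma index?_cons_ne {b c : Char} (t : List Char) (h : ¬ b = c) :
    PySem.List.index? (c :: t) b = (PySem.List.index? t b).map (· + 1) := by
  have hcb : (c == b) = false := by
    simp only [beq_eq_false_iff_ne, ne_eq]
    exact fun h' => h h'.symm
  simp [PySem.List.index?, List.idxOf?_cons, hcb]

lemma idx_cons_of_ne_mem {b c : Char} {t : List Char} (hne : b ≠ c) (hb : b ∈ t) :
    (PySem.List.index? (c :: t) b).getD 0 = (PySem.List.index? t b).getD 0 + 1 := by
  have hs : (PySem.List.index? t b).isSome := by
    simp [PySem.List.index?, List.isSome_idxOf?, hb]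
  obtain ⟨n, hn⟩ := Option.isSome_iff_exists.mp hs
  rw [index?_cons_ne t hne, hn]
  rfl

-- the first-occurrence alphabet is strictly increasing under word.index
lemma pairwise_idx (w : List Char) :
    List.Pairwise (fun a b => (PySem.List.index? w a).getD 0 < (PySem.List.index? w b).getD 0)
      (PySem.Set.ofList w) := by
  induction w with
  | nil => simp [PySem.Set.ofList]
  | cons c t ih =>
    rw [ofList_cons]
    simp only [List.singleton_append, List.pairwise_cons]
    constructor
    · intro b hbmem
      have hbne : b ≠ c := by
        have := (List.mem_filter.mp hbmem).2
        simp [PySem.Set.contains] at this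
        exact fun h => this (by rw [h])
      have hbt : b ∈ t := (PySem.Set.mem_ofList t b).mp (List.mem_filter.mp hbmem).1
      have hc0 : (PySem.List.index? (c :: t) c).getD 0 = 0 := by
        simp [PySem.List.index?, List.idxOf?_cons]
      rw [hc0, idx_cons_of_ne_mem hbne hbt]
      omega
    · refine (ih.filter (fun b => !PySem.Set.contains [c] b)).imp_of_mem ?_
      intro a b ha hb hlt
      have hat : a ∈ t := (PySem.Set.mem_ofList t a).mp (List.mem_filter.mp ha).1
      have hbt : b ∈ t := (PySem.Set.mem_ofList t b).mp (List.mem_filter.mp hb).1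
      have hane : a ≠ c := by
        have := (List.mem_filter.mp ha).2; simp [PySem.Set.contains] at this; exact fun h => this (by rw [h])
      have hbne : b ≠ c := by
        have := (List.mem_filter.mp hb).2; simp [PySem.Set.contains] at this; exact fun h => this (by rw [h])
      rw [idx_cons_of_ne_mem hane hat, idx_cons_of_ne_mem hbne hbt]
      omega

lemma firsts_eq (w : List Char) :
    PySem.List.sorted (PySem.Set.ofList w) (fun c => (PySem.List.index? w c).getD 0)
      = PySem.Set.ofList w :=
  PySem.List.sorted_eq_of_perm_of_pairwise_lt _ _ _ (List.Perm.refl _) (pairwise_idx w)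

lemma contains_dmap (s : List Char) (c : Char) :
    (dmap s).contains (String.ofList [c]) = s.contains c := by
  rw [dmap, contains_dmapFrom]
  simp [PySem.Dict.empty]

-- A's fold from (dmap s, |s|, h) lands on dmap of the final alphabet, its size,
-- and h extended by the suffix mapped through the final dict
lemma main_inv (l : List Char) (s : PySem.Set Char) (h : List Char) :
    l.foldl stepA (dmap s, (s.length : Int), h)
    = (dmap (l.foldl PySem.Set.add s), ((l.foldl PySem.Set.add s).length : Int),
       h ++ (l.map (fun c =>
         ((dmap (l.foldl PySem.Set.add s)).getD (String.ofList [c]) "").toList)).flatten) := by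
  induction l generalizing s h with
  | nil => simp
  | cons c rest ih =>
    simp only [List.foldl_cons, List.map_cons, List.flatten_cons]
    by_cases hc : c ∈ s
    · have hcd : (dmap s).contains (String.ofList [c]) = true := by
        rw [contains_dmap]; exact List.contains_iff_mem.mpr hc
      have hA : stepA (dmap s, (s.length : Int), h) c
          = (dmap s, (s.length : Int), h ++ ((dmap s).getD (String.ofList [c]) "").toList) := by
        simp [stepA, hcd]
      have hadd : PySem.Set.add s c = s := by simp [PySem.Set.add, hc]
      rw [hA, hadd, ih s _]
      have hpres : (dmap (rest.foldl PySem.Set.add s)).getD (String.ofList [c]) ""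
          = (dmap s).getD (String.ofList [c]) "" := by
        rw [foldl_add_append rest s, dmap, dmapFrom_append,
            PySem.Dict.getD_eq_get?_getD, PySem.Dict.getD_eq_get?_getD,
            get?_dmapFrom_of_not_mem _ _ _ c ?_, dmap]
        intro hmem
        have := (List.mem_filter.mp hmem).2
        simp [hc] at this
      rw [hpres, List.append_assoc]
    · have hcd : (dmap s).contains (String.ofList [c]) = false := by
        rw [contains_dmap]; simp [hc]
      have hins : dmap (s ++ [c])
          = (dmap s).insert (String.ofList [c]) (PySem.Int.toStr (s.length : Int)) := by
        rw [dmap, dmapFrom_append, dmapFrom_cons]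
        simp [dmapFrom, PySem.List.enumerate, dmap]
      have hA : stepA (dmap s, (s.length : Int), h) c
          = (dmap (s ++ [c]), (s.length : Int) + 1,
             h ++ ((dmap (s ++ [c])).getD (String.ofList [c]) "").toList) := by
        simp [stepA, hcd, hins]
      have hadd : PySem.Set.add s c = s ++ [c] := by simp [PySem.Set.add, hc]
      have hlen : ((s.length : Int) + 1) = (((s ++ [c]).length : Nat) : Int) := by
        simp [List.length_append]
      rw [hA, hadd, hlen, ih (s ++ [c]) _]
      have hpres : (dmap (rest.foldl PySem.Set.add (s ++ [c]))).getD (String.ofList [c]) ""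
          = (dmap (s ++ [c])).getD (String.ofList [c]) "" := by
        rw [foldl_add_append rest (s ++ [c]), dmap, dmapFrom_append,
            PySem.Dict.getD_eq_get?_getD, PySem.Dict.getD_eq_get?_getD,
            get?_dmapFrom_of_not_mem _ _ _ c ?_, dmap]
        intro hmem
        have := (List.mem_filter.mp hmem).2
        have hcc : (s ++ [c]).contains c = true := List.contains_iff_mem.mpr (by simp)
        rw [hcc] at this
        simp at this
      rw [hpres, List.append_assoc]

-- ===== VERDICT (by name: the statement is the Claim_ definition above) =====
theorem new_hash_spec : Claim_equal_new_hash := by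
  intro word _
  unfold Spec_new_hash new_hash new_hash_alt
  rw [firsts_eq]
  have h0 : dmap ([] : List Char) = PySem.Dict.empty := by
    simp [dmap, dmapFrom, PySem.List.enumerate]
  have hinv := main_inv word.toList ([] : PySem.Set Char) []
  rw [h0] at hinv
  simp only [List.length_nil, Nat.cast_zero] at hinv
  rw [hinv, ← PySem.Set.ofList_eq_foldl]
  simp [dmap, dmapFrom]
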